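-- pv_equiv track=rewrite | github.com/mattdawe-collab/epg-host | src/epg_cache.py | validate_epg_coverage
-- ===== SOURCE A (Python) =====
-- from typing import Dict, Set, Tuple, List, Callable, Optional
--
-- def validate_epg_coverage(valid_ids: Set[str]) -> Dict[str, int]:
--     """
--     Analyze EPG coverage by region/network.
--     Returns counts of channels by category.
--     """
--     stats = {
--         'us_total': 0,
--         'ca_total': 0,
--         'uk_total': 0,
--         'us_locals': 0,
--         'us_cable': 0,
--         'ca_broadcast': 0,
--         'ca_specialty': 0,
--     }
--
--     for xmlid in valid_ids:
--         if xmlid.endswith('.us'):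
--             stats['us_total'] += 1
--             # Check if it looks like a local station (has parentheses with callsign)
--             if '(' in xmlid and ')' in xmlid:
--                 stats['us_locals'] += 1
--             else:
--                 stats['us_cable'] += 1
--         elif xmlid.endswith('.ca'):
--             stats['ca_total'] += 1
--         elif xmlid.endswith('.uk'):
--             stats['uk_total'] += 1
--
--     return stats
-- ===== SOURCE B (Python) =====
-- def validate_epg_coverage(valid_ids):
--     """Same statistics computed one at a time: independent scans instead of one classifying loop."""
--     us = [x for x in valid_ids if x.endswith('.us')]
--     us_total = len(us)
--     us_locals = sum(1 for x in us if '(' in x and ')' in x)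
--     return {
--         'us_total': us_total,
--         'ca_total': sum(1 for x in valid_ids if x.endswith('.ca')),
--         'uk_total': sum(1 for x in valid_ids if x.endswith('.uk')),
--         'us_locals': us_locals,
--         'us_cable': us_total - us_locals,
--         'ca_broadcast': 0,
--         'ca_specialty': 0,
--     }
-- ===== Notes on version B (the rewrite author's own statement) =====
-- stated objective: idiomatic
-- what changed: Replaces A's single branching loop mutating a stats dict with independent filter/count passes (us ids filtered once, us_cable derived as us_total - us_locals) assembled into the dict literal.
import Mathlib
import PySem

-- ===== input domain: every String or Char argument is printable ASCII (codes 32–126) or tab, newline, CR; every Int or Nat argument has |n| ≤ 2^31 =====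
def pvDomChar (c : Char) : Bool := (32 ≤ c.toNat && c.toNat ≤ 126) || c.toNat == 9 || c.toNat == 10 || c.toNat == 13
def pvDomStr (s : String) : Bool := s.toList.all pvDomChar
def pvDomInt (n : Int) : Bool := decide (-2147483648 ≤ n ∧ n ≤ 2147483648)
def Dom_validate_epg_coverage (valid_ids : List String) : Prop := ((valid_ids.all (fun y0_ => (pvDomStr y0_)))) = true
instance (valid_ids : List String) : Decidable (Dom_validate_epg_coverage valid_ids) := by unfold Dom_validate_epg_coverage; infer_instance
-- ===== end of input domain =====

-- B computes each statistic as an independent filter/count pass (us_cable derived as us_total - us_locals) instead of A's single branching loop mutating a stats dict; objective: idiomatic decomposition, same O(n) cost.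


-- ===== PORT A =====
def validate_epg_coverage (valid_ids : List String) : List (String × Int) :=
  let stats : PySem.Dict String Int :=
    PySem.Dict.ofList [("us_total", 0), ("ca_total", 0), ("uk_total", 0),
                       ("us_locals", 0), ("us_cable", 0), ("ca_broadcast", 0), ("ca_specialty", 0)]
  let stats := valid_ids.foldl (fun stats xmlid =>
    if PySem.Str.endswith xmlid ".us" then
      let stats := stats.modify "us_total" 0 (· + 1)
      if PySem.Str.isIn "(" xmlid && PySem.Str.isIn ")" xmlid then
        stats.modify "us_locals" 0 (· + 1)
      else
        stats.modify "us_cable" 0 (· + 1)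
    else if PySem.Str.endswith xmlid ".ca" then
      stats.modify "ca_total" 0 (· + 1)
    else if PySem.Str.endswith xmlid ".uk" then
      stats.modify "uk_total" 0 (· + 1)
    else
      stats) stats
  stats.items

-- ===== PORT B =====
def validate_epg_coverage_alt (valid_ids : List String) : List (String × Int) :=
  let us := valid_ids.filter (fun x => PySem.Str.endswith x ".us")
  let us_total : Int := (us.length : Int)
  let us_locals : Int :=
    ((us.filter (fun x => PySem.Str.isIn "(" x && PySem.Str.isIn ")" x)).length : Int)
  [("us_total", us_total),
   ("ca_total", ((valid_ids.filter (fun x => PySem.Str.endswith x ".ca")).length : Int)),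
   ("uk_total", ((valid_ids.filter (fun x => PySem.Str.endswith x ".uk")).length : Int)),
   ("us_locals", us_locals),
   ("us_cable", us_total - us_locals),
   ("ca_broadcast", 0),
   ("ca_specialty", 0)]

-- ===== PRECONDITION & SPEC =====
def Spec_validate_epg_coverage (valid_ids : List String) (out : List (String × Int)) : Prop := out = validate_epg_coverage_alt valid_ids
instance (valid_ids : List String) (out : List (String × Int)) : Decidable (Spec_validate_epg_coverage valid_ids out) := by unfold Spec_validate_epg_coverage; infer_instance

-- ===== CLAIM (what is proved, stated in full; the proofs are below) =====
def Claim_equal_validate_epg_coverage : Prop := ∀ (valid_ids : List String), Dom_validate_epg_coverage valid_ids → Spec_validate_epg_coverage valid_ids (validate_epg_coverage valid_ids)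

-- ===== LEMMAS AND PROOFS =====

-- Two distinct suffixes of equal length cannot both end a string.
theorem pv_endswith_excl (x p q : String) (hlen : p.toList.length = q.toList.length)
    (hne : p.toList ≠ q.toList) (h : PySem.Str.endswith x p = true) :
    PySem.Str.endswith x q = false := by
  rw [PySem.Str.endswith_eq] at *
  rw [PySem.Chars.endswith_iff] at h
  rw [Bool.eq_false_iff, Ne, PySem.Chars.endswith_iff]
  intro h2
  rcases List.suffix_or_suffix_of_suffix h h2 with h3 | h3
  · exact hne (h3.eq_of_length hlen)
  · exact hne (h3.eq_of_length hlen.symm).symm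

-- A's loop on the literal 7-key dict, characterised by B's filter counts.
theorem pv_loopA (l : List String) (a b c d e : Int) :
    (l.foldl (fun stats xmlid =>
      if PySem.Str.endswith xmlid ".us" then
        if PySem.Str.isIn "(" xmlid && PySem.Str.isIn ")" xmlid then
          (stats.modify "us_total" 0 (· + 1)).modify "us_locals" 0 (· + 1)
        else
          (stats.modify "us_total" 0 (· + 1)).modify "us_cable" 0 (· + 1)
      else if PySem.Str.endswith xmlid ".ca" then
        stats.modify "ca_total" 0 (· + 1)
      else if PySem.Str.endswith xmlid ".uk" then
        stats.modify "uk_total" 0 (· + 1)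
      else
        stats)
      (PySem.Dict.mk [("us_total", a), ("ca_total", b), ("uk_total", c),
                      ("us_locals", d), ("us_cable", e), ("ca_broadcast", 0), ("ca_specialty", 0)]))
    = PySem.Dict.mk
        [("us_total", a + ((l.filter (fun x => PySem.Str.endswith x ".us")).length : Int)),
         ("ca_total", b + ((l.filter (fun x => PySem.Str.endswith x ".ca")).length : Int)),
         ("uk_total", c + ((l.filter (fun x => PySem.Str.endswith x ".uk")).length : Int)),
         ("us_locals", d + (((l.filter (fun x => PySem.Str.endswith x ".us")).filter
              (fun x => PySem.Str.isIn "(" x && PySem.Str.isIn ")" x)).length : Int)),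
         ("us_cable", e + (((l.filter (fun x => PySem.Str.endswith x ".us")).filter
              (fun x => !(PySem.Str.isIn "(" x && PySem.Str.isIn ")" x))).length : Int)),
         ("ca_broadcast", 0), ("ca_specialty", 0)] := by
  induction l generalizing a b c d e with
  | nil => simp
  | cons x t ih =>
    simp only [List.foldl_cons]
    by_cases hus : PySem.Str.endswith x ".us" = true
    · have hca := pv_endswith_excl x ".us" ".ca" (by decide) (by decide) hus
      have huk := pv_endswith_excl x ".us" ".uk" (by decide) (by decide) hus
      by_cases hloc : (PySem.Str.isIn "(" x && PySem.Str.isIn ")" x) = true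
      · simp only [hus, hloc, if_true]
        rw [show ((PySem.Dict.mk [("us_total", a), ("ca_total", b), ("uk_total", c),
              ("us_locals", d), ("us_cable", e), ("ca_broadcast", 0), ("ca_specialty", 0)]).modify
              "us_total" 0 (· + 1)).modify "us_locals" 0 (· + 1)
            = PySem.Dict.mk [("us_total", a + 1), ("ca_total", b), ("uk_total", c),
              ("us_locals", d + 1), ("us_cable", e), ("ca_broadcast", 0), ("ca_specialty", 0)] from rfl,
            ih]
        simp only [List.filter_cons, hus, hloc, hca, huk, if_true, if_false, Bool.false_eq_true,
          Bool.not_true, Bool.not_false,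
          List.length_cons, PySem.Dict.mk.injEq, List.cons.injEq, Prod.mk.injEq, true_and, and_true]
        push_cast
        omega
      · simp only [hus, hloc, Bool.false_eq_true, Bool.not_true, if_true, if_false]
        rw [show ((PySem.Dict.mk [("us_total", a), ("ca_total", b), ("uk_total", c),
              ("us_locals", d), ("us_cable", e), ("ca_broadcast", 0), ("ca_specialty", 0)]).modify
              "us_total" 0 (· + 1)).modify "us_cable" 0 (· + 1)
            = PySem.Dict.mk [("us_total", a + 1), ("ca_total", b), ("uk_total", c),
              ("us_locals", d), ("us_cable", e + 1), ("ca_broadcast", 0), ("ca_specialty", 0)] from rfl,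
            ih]
        simp only [List.filter_cons, hus, hloc, hca, huk, Bool.not_false, Bool.not_true,
          Bool.false_eq_true, if_true, if_false,
          List.length_cons, PySem.Dict.mk.injEq, List.cons.injEq, Prod.mk.injEq, true_and, and_true]
        push_cast
        omega
    · by_cases hca : PySem.Str.endswith x ".ca" = true
      · have huk := pv_endswith_excl x ".ca" ".uk" (by decide) (by decide) hca
        simp only [hus, hca, Bool.false_eq_true, if_true, if_false]
        rw [show (PySem.Dict.mk [("us_total", a), ("ca_total", b), ("uk_total", c),
              ("us_locals", d), ("us_cable", e), ("ca_broadcast", 0), ("ca_specialty", 0)]).modify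
              "ca_total" 0 (· + 1)
            = PySem.Dict.mk [("us_total", a), ("ca_total", b + 1), ("uk_total", c),
              ("us_locals", d), ("us_cable", e), ("ca_broadcast", 0), ("ca_specialty", 0)] from rfl,
            ih]
        simp only [List.filter_cons, hus, hca, huk, if_true, if_false, Bool.false_eq_true,
          List.length_cons, PySem.Dict.mk.injEq, List.cons.injEq, Prod.mk.injEq, true_and, and_true]
        push_cast
        omega
      · by_cases huk : PySem.Str.endswith x ".uk" = true
        · simp only [hus, hca, huk, Bool.false_eq_true, if_true, if_false]
          rw [show (PySem.Dict.mk [("us_total", a), ("ca_total", b), ("uk_total", c),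
                ("us_locals", d), ("us_cable", e), ("ca_broadcast", 0), ("ca_specialty", 0)]).modify
                "uk_total" 0 (· + 1)
              = PySem.Dict.mk [("us_total", a), ("ca_total", b), ("uk_total", c + 1),
                ("us_locals", d), ("us_cable", e), ("ca_broadcast", 0), ("ca_specialty", 0)] from rfl,
              ih]
          simp only [List.filter_cons, hus, hca, huk, if_true, if_false, List.length_cons,
            PySem.Dict.mk.injEq, List.cons.injEq, Prod.mk.injEq, true_and, and_true]
          push_cast
          omega
        · simp only [hus, hca, huk, Bool.false_eq_true, if_false]
          rw [ih]
          simp only [List.filter_cons, hus, hca, huk, Bool.false_eq_true, if_true, if_false,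
            PySem.Dict.mk.injEq, List.cons.injEq, Prod.mk.injEq, true_and, and_true]

-- ===== VERDICT (by name: the statement is the Claim_ definition above) =====
theorem validate_epg_coverage_spec : Claim_equal_validate_epg_coverage := by
  intro l _
  show validate_epg_coverage l = validate_epg_coverage_alt l
  simp only [validate_epg_coverage, validate_epg_coverage_alt]
  rw [show (PySem.Dict.ofList [("us_total", (0:Int)), ("ca_total", 0), ("uk_total", 0),
        ("us_locals", 0), ("us_cable", 0), ("ca_broadcast", 0), ("ca_specialty", 0)])
      = PySem.Dict.mk [("us_total", 0), ("ca_total", 0), ("uk_total", 0),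
        ("us_locals", 0), ("us_cable", 0), ("ca_broadcast", 0), ("ca_specialty", 0)] from rfl,
      pv_loopA]
  simp only [PySem.Dict.items, zero_add, List.cons.injEq, Prod.mk.injEq, List.nil_eq]
  have h := List.length_eq_length_filter_add
    (l := l.filter (fun x => PySem.Str.endswith x ".us"))
    (fun x => PySem.Str.isIn "(" x && PySem.Str.isIn ")" x)
  simp only [true_and, and_true]
  push_cast
  omega
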